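-- pv_equiv track=rewrite | github.com/fbm2718/QREM | functions/ancillary_functions.py | register_names_qubits
-- ===== SOURCE A (Python) =====
-- from typing import List, Dict, Optional
--
-- def bit_strings(number_of_qubits: int,
--                 reversed: Optional[bool] = False):
--     """Generate outcome bitstrings for n-qubits.
--
--     Args:
--         number_of_qubits (int): the number of qubits.
--
--     Returns:
--         list: arrray_to_print list of bitstrings ordered as follows:
--         Example: n=2 returns ['00', '01', '10', '11'].
-- """
--     if (reversed == True):
--         return [(bin(j)[2:].zfill(number_of_qubits))[::-1] for j in list(range(2 ** number_of_qubits))]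
--     else:
--         return [(bin(j)[2:].zfill(number_of_qubits)) for j in list(range(2 ** number_of_qubits))]
--
-- def register_names_qubits(qubit_indices,
--                           quantum_register_size=None,
--                           rev=False):
--     """
--     Register of qubits of size quantum_register_size, with only bits corresponding to qubit_indices
--     varying
--
--     :param qubit_indices:
--     :param quantum_register_size:
--     :param rev:
--     :return:
--     """
--
--     # TODO FBM: refactor this function.
--
--     if quantum_register_size is None:
--         quantum_register_size = len(qubit_indices)
--
--     if quantum_register_size == 0:
--         return ['']
--
--     if (quantum_register_size == 1):
--         return ['0', '1']
--
--     all_names = bit_strings(quantum_register_size, rev)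
--     not_used = []
--
--     for j in list(range(quantum_register_size)):
--         if j not in qubit_indices:
--             not_used.append(j)
--
--     bad_names = []
--     for name in all_names:
--         for k in (not_used):
--             rev_name = name[::-1]
--             if (rev_name[k] == '1'):
--                 bad_names.append(name)
--
--     relevant_names = []
--     for name in all_names:
--         if name not in bad_names:
--             relevant_names.append(name)
--
--     return relevant_names
-- ===== SOURCE B (Python) =====
-- def register_names_qubits(qubit_indices,
--                           quantum_register_size=None,
--                           rev=False):
--     """Register bitstrings where only the selected qubit positions vary.
--
--     Builds the 2**k relevant strings directly by a product construction over
--     the register positions, instead of filtering all 2**n bitstrings.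
--     """
--     if quantum_register_size is None:
--         quantum_register_size = len(qubit_indices)
--
--     # positions in the order their character is appended (left to right);
--     # with rev=True the varying character positions count from the left.
--     if rev:
--         positions = range(quantum_register_size)
--     else:
--         positions = range(quantum_register_size - 1, -1, -1)
--
--     acc = ['']
--     for p in positions:
--         if p in qubit_indices:
--             acc = [s + c for s in acc for c in '01']
--         else:
--             acc = [s + '0' for s in acc]
--
--     if rev:
--         return [s[::-1] for s in acc]
--     return acc
-- ===== Notes on version B (the rewrite author's own statement) =====
-- stated objective: alternative
-- what changed: A enumerates all 2^n bitstrings, builds a quadratic-size bad_names list and filters by membership in it; B builds only the 2^k relevant strings directly by a product construction over the register positions.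
-- intended difference: On inputs of effective register size 1 whose qubit 0 is not in qubit_indices, A's hard-coded shortcut returns ['0','1'] (letting the unselected qubit vary), while B returns ['0']; B's value is the intended one since everywhere else only selected qubits vary. — e.g. on register_names_qubits([1], some 1, false): A returns ["0", "1"], B returns ["0"]
import Mathlib
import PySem

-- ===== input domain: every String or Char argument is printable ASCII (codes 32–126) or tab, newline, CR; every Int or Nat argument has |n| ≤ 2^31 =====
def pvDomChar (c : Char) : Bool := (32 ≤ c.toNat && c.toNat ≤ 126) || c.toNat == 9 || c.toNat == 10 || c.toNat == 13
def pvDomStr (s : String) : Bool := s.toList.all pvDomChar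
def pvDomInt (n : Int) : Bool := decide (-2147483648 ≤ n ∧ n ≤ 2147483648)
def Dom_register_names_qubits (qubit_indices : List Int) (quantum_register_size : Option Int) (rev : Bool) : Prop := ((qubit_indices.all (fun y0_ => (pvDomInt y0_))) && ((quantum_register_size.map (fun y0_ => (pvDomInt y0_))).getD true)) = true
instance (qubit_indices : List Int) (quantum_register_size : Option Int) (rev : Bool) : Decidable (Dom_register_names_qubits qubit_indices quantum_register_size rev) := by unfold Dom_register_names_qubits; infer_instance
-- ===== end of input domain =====

-- B replaces A's "generate all 2^n bitstrings, collect the bad ones, filter" by a direct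
-- product construction of the 2^k relevant strings (alternative algorithm).

-- ===== PORT A =====

-- s[::-1]  (= PySem.Str.slice? s none none (-1), by PySem.Str.slice?_none_none_neg_one)
def pyRevStr (s : String) : String := String.ofList s.toList.reverse

-- bin(j)[2:] for the j ≥ 0 produced by range(2**n) is PySem.Int.toBin j (format(j,'b')).
-- 2 ** n is ported as 2 ^ n.toNat: exact for 0 ≤ n (Pre_ excludes negative explicit sizes,
-- on which Python's range(2**n) raises TypeError).
def bit_strings (number_of_qubits : Int) (reversed : Bool) : List String :=
  if reversed = true then
    (PySem.List.pyRange 0 (2 ^ number_of_qubits.toNat) 1).map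
      (fun j => pyRevStr (PySem.Str.zfill (PySem.Int.toBin j) number_of_qubits))
  else
    (PySem.List.pyRange 0 (2 ^ number_of_qubits.toNat) 1).map
      (fun j => PySem.Str.zfill (PySem.Int.toBin j) number_of_qubits)

def register_names_qubits (qubit_indices : List Int) (quantum_register_size : Option Int) (rev : Bool) : List String :=
  let n : Int := match quantum_register_size with
    | none => PySem.List.len qubit_indices
    | some m => m
  if n = 0 then [""]
  else if n = 1 then ["0", "1"]
  else
    let all_names := bit_strings n rev
    let not_used := (PySem.List.pyRange 0 n 1).foldl
      (fun acc j => if j ∈ qubit_indices then acc else acc ++ [j]) []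
    let bad_names := all_names.foldl (fun bad name =>
      not_used.foldl (fun bad k =>
        if PySem.Str.pyGet? (pyRevStr name) k == some '1' then bad ++ [name] else bad) bad) []
    all_names.foldl (fun rel name => if name ∈ bad_names then rel else rel ++ [name]) []

-- ===== PORT B =====
def register_names_qubits_alt (qubit_indices : List Int) (quantum_register_size : Option Int) (rev : Bool) : List String :=
  let n : Int := match quantum_register_size with
    | none => PySem.List.len qubit_indices
    | some m => m
  let positions := if rev then PySem.List.pyRange 0 n 1 else PySem.List.pyRange (n - 1) (-1) (-1)
  let acc := positions.foldl (fun acc p =>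
    if p ∈ qubit_indices then acc.flatMap (fun s => [s ++ "0", s ++ "1"])
    else acc.map (fun s => s ++ "0")) [""]
  if rev then acc.map pyRevStr else acc

-- ===== PRECONDITION & SPEC =====
-- Pre_ excludes exactly the explicit register sizes on which A RAISES and never returns:
-- negative n (2**n is a float, so range(2**n) raises TypeError) and n ≥ 33, where A's
-- list(range(2**n)) raises OverflowError for n ≥ 63 (range longer than sys.maxsize) and
-- MemoryError below that (it materializes 2**n ≥ 8·10^9 indices before anything else).
def Pre_register_names_qubits (qubit_indices : List Int) (quantum_register_size : Option Int) (rev : Bool) : Prop :=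
  0 ≤ quantum_register_size.getD 0 ∧ quantum_register_size.getD 0 ≤ 32
instance (qubit_indices : List Int) (quantum_register_size : Option Int) (rev : Bool) : Decidable (Pre_register_names_qubits qubit_indices quantum_register_size rev) := by unfold Pre_register_names_qubits; infer_instance

def pvWitness_register_names_qubits : List Int × Option Int × Bool := ([0, 2], some 3, false)


-- On registers of effective size 1 whose qubit 0 is NOT selected, A's hard-coded shortcut
-- returns ['0','1'] (letting the unselected qubit vary), while B returns the intended ['0']
-- (only selected qubits vary, as everywhere else).
def D_register_names_qubits (qubit_indices : List Int) (quantum_register_size : Option Int) (rev : Bool) : Prop :=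
  (quantum_register_size = some 1 ∨ (quantum_register_size = none ∧ qubit_indices.length = 1)) ∧
    (0 : Int) ∉ qubit_indices
instance (qubit_indices : List Int) (quantum_register_size : Option Int) (rev : Bool) : Decidable (D_register_names_qubits qubit_indices quantum_register_size rev) := by unfold D_register_names_qubits; infer_instance

def Spec_register_names_qubits (qubit_indices : List Int) (quantum_register_size : Option Int) (rev : Bool) (out : List String) : Prop := ¬ D_register_names_qubits qubit_indices quantum_register_size rev → out = register_names_qubits_alt qubit_indices quantum_register_size rev
instance (qubit_indices : List Int) (quantum_register_size : Option Int) (rev : Bool) (out : List String) : Decidable (Spec_register_names_qubits qubit_indices quantum_register_size rev out) := by unfold Spec_register_names_qubits; infer_instance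

def pvDiffWitness_register_names_qubits : List Int × Option Int × Bool := ([1], some 1, false)
def pvDiffWitnessOut_register_names_qubits : (List String) × (List String) := (["0", "1"], ["0"])

-- ===== CLAIM (what is proved, stated in full; the proofs are below) =====
def Claim_unchanged_register_names_qubits : Prop := ∀ (qubit_indices : List Int) (quantum_register_size : Option Int) (rev : Bool), Dom_register_names_qubits qubit_indices quantum_register_size rev → Pre_register_names_qubits qubit_indices quantum_register_size rev → Spec_register_names_qubits qubit_indices quantum_register_size rev (register_names_qubits qubit_indices quantum_register_size rev)
def Claim_changed_register_names_qubits : Prop := Dom_register_names_qubits (pvDiffWitness_register_names_qubits.1) (pvDiffWitness_register_names_qubits.2.1) (pvDiffWitness_register_names_qubits.2.2) ∧ Pre_register_names_qubits (pvDiffWitness_register_names_qubits.1) (pvDiffWitness_register_names_qubits.2.1) (pvDiffWitness_register_names_qubits.2.2) ∧ D_register_names_qubits (pvDiffWitness_register_names_qubits.1) (pvDiffWitness_register_names_qubits.2.1) (pvDiffWitness_register_names_qubits.2.2) ∧ register_names_qubits (pvDiffWitness_register_names_qubits.1) (pvDiffWitness_register_names_qubits.2.1) (pvDiffWitness_register_names_qubits.2.2)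 = pvDiffWitnessOut_register_names_qubits.1 ∧ register_names_qubits_alt (pvDiffWitness_register_names_qubits.1) (pvDiffWitness_register_names_qubits.2.1) (pvDiffWitness_register_names_qubits.2.2) = pvDiffWitnessOut_register_names_qubits.2 ∧ pvDiffWitnessOut_register_names_qubits.1 ≠ pvDiffWitnessOut_register_names_qubits.2
def Claim_exact_register_names_qubits : Prop := ∀ (qubit_indices : List Int) (quantum_register_size : Option Int) (rev : Bool), Dom_register_names_qubits qubit_indices quantum_register_size rev → Pre_register_names_qubits qubit_indices quantum_register_size rev → D_register_names_qubits qubit_indices quantum_register_size rev → register_names_qubits qubit_indices quantum_register_size rev ≠ register_names_qubits_alt qubit_indices quantum_register_size rev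

-- ===== LEMMAS AND PROOFS =====

-- MSB-first binary digits of j, width w
def bits : Nat → Nat → List Char
  | 0, _ => []
  | w + 1, j => bits w (j / 2) ++ [if j % 2 = 1 then '1' else '0']

-- the product construction over positions w-1, …, 0 with variability oracle U
def genL (U : Nat → Bool) : Nat → List (List Char)
  | 0 => [[]]
  | a + 1 =>
    if U a then (genL U a).map ('0' :: ·) ++ (genL U a).map ('1' :: ·)
    else (genL U a).map ('0' :: ·)

-- "no unselected position carries a '1'" (indices counted in s.reverse)
abbrev Good (U : Nat → Bool) (w : Nat) (s : List Char) : Prop :=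
  ∀ p : Nat, p < w → U p = false → s.reverse[p]? ≠ some '1'

lemma bits_length (w j : Nat) : (bits w j).length = w := by
  induction w generalizing j with
  | zero => rfl
  | succ w ih => simp [bits, ih]

lemma bits_zero (w : Nat) : bits w 0 = List.replicate w '0' := by
  induction w with
  | zero => rfl
  | succ w ih => simp [bits, ih, List.replicate_succ']

lemma bits_cons (w b r : Nat) (hr : r < 2 ^ w) :
    bits (w + 1) (b * 2 ^ w + r) = (if b % 2 = 1 then '1' else '0') :: bits w r := by
  induction w generalizing b r with
  | zero =>
    interval_cases r
    simp [bits]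
  | succ w ih =>
    have he : b * 2 ^ (w + 1) + r = 2 * (b * 2 ^ w) + r := by ring
    have h1 : (b * 2 ^ (w + 1) + r) / 2 = b * 2 ^ w + r / 2 := by
      rw [he, Nat.mul_add_div (by omega)]
    have h2 : (b * 2 ^ (w + 1) + r) % 2 = r % 2 := by
      rw [he, Nat.mul_add_mod]
    have hr2 : r / 2 < 2 ^ w := by
      rw [pow_succ] at hr; omega
    rw [bits, h1, h2, ih b (r / 2) hr2, bits]
    rfl

-- ---- Nat.toDigits 2 facts ----

lemma tdc_append (f : Nat) : ∀ (n : Nat) (ds : List Char),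
    Nat.toDigitsCore 2 f n ds = Nat.toDigitsCore 2 f n [] ++ ds := by
  induction f with
  | zero => intro n ds; simp [Nat.toDigitsCore]
  | succ f ih =>
    intro n ds
    simp only [Nat.toDigitsCore]
    by_cases h : n / 2 = 0
    · simp [h]
    · simp only [if_neg h]
      rw [ih (n / 2) [Nat.digitChar (n % 2)], ih (n / 2) (Nat.digitChar (n % 2) :: ds)]
      simp

lemma tdc_fuel : ∀ (f₁ : Nat), ∀ (f₂ n : Nat) (ds : List Char), n < f₁ → n < f₂ →
    Nat.toDigitsCore 2 f₁ n ds = Nat.toDigitsCore 2 f₂ n ds := by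
  intro f₁
  induction f₁ with
  | zero => intro f₂ n ds h1 _; omega
  | succ f₁ ih =>
    intro f₂ n ds h1 h2
    obtain ⟨f₂', rfl⟩ : ∃ f₂', f₂ = f₂' + 1 := ⟨f₂ - 1, by omega⟩
    simp only [Nat.toDigitsCore]
    by_cases h : n / 2 = 0
    · simp [h]
    · simp only [if_neg h]
      exact ih f₂' (n / 2) _ (by omega) (by omega)

lemma toDigits_two_rec (n : Nat) (hn : 2 ≤ n) :
    Nat.toDigits 2 n = Nat.toDigits 2 (n / 2) ++ [Nat.digitChar (n % 2)] := by
  unfold Nat.toDigits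
  conv_lhs => rw [Nat.toDigitsCore]
  rw [if_neg (by omega)]
  rw [tdc_fuel n (n / 2 + 1) (n / 2) _ (by omega) (by omega)]
  rw [tdc_append]

lemma toDigits_two_01 (n : Nat) : ∀ c ∈ Nat.toDigits 2 n, c = '0' ∨ c = '1' := by
  induction n using Nat.strong_induction_on with
  | _ n ih =>
    match n, ih with
    | 0, _ => intro c hc; norm_num [Nat.toDigits, Nat.toDigitsCore, Nat.digitChar] at hc; simp [hc]
    | 1, _ => intro c hc; norm_num [Nat.toDigits, Nat.toDigitsCore, Nat.digitChar] at hc; simp [hc]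
    | (n + 2), ih =>
      rw [toDigits_two_rec (n + 2) (by omega)]
      intro c hc
      rcases List.mem_append.1 hc with h | h
      · exact ih ((n + 2) / 2) (by omega) c h
      · have : (n + 2) % 2 = 0 ∨ (n + 2) % 2 = 1 := by omega
        rcases this with h2 | h2 <;> simp_all [Nat.digitChar]

lemma toDigits_two_ne_nil (n : Nat) : Nat.toDigits 2 n ≠ [] := by
  match n with
  | 0 => norm_num [Nat.toDigits, Nat.toDigitsCore]
  | 1 => norm_num [Nat.toDigits, Nat.toDigitsCore]
  | (n + 2) => rw [toDigits_two_rec (n + 2) (by omega)]; simp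

lemma zfill_nat (c : Char) (rest : List Char) (hc : c ≠ '+' ∧ c ≠ '-') (w : Nat) :
    PySem.Chars.zfill (c :: rest) (w : Int) =
      List.replicate (w - (c :: rest).length) '0' ++ (c :: rest) := by
  unfold PySem.Chars.zfill
  by_cases h : (w : Int) ≤ ((c :: rest).length : Int)
  · rw [if_pos h]
    have h0 : w - (c :: rest).length = 0 := by omega
    simp only [h0, List.replicate_zero, List.nil_append]
  · rw [if_neg h]
    simp only [if_neg (by tauto : ¬(c = '+' ∨ c = '-'))]
    have h1 : (w : Int).toNat = w := by omega
    rw [h1]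

lemma pad_bits (w : Nat) (hw : 1 ≤ w) : ∀ j : Nat, j < 2 ^ w →
    List.replicate (w - (Nat.toDigits 2 j).length) '0' ++ Nat.toDigits 2 j = bits w j := by
  induction w with
  | zero => omega
  | succ w ih =>
    intro j hj
    by_cases hw1 : w = 0
    · subst hw1
      interval_cases j <;> simp [Nat.toDigits, Nat.toDigitsCore, bits] <;> decide
    · by_cases hj1 : j ≤ 1
      · have hb : bits (w + 1) j = List.replicate w '0' ++ [if j % 2 = 1 then '1' else '0'] := by
          have : j / 2 = 0 := by omega
          rw [bits, this, bits_zero]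
        interval_cases j
        · rw [hb]; norm_num [Nat.toDigits, Nat.toDigitsCore, Nat.digitChar, List.replicate_succ']
        · rw [hb]; norm_num [Nat.toDigits, Nat.toDigitsCore, Nat.digitChar, List.replicate_succ']
      · rw [toDigits_two_rec j (by omega)]
        have hlen := toDigits_two_ne_nil (j / 2)
        have hj2 : j / 2 < 2 ^ w := by rw [pow_succ] at hj; omega
        have ihj := ih (by omega) (j / 2) hj2
        rw [bits]
        have hdig : Nat.digitChar (j % 2) = if j % 2 = 1 then '1' else '0' := by
          have : j % 2 = 0 ∨ j % 2 = 1 := by omega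
          rcases this with h | h <;> norm_num [h, Nat.digitChar]
        rw [hdig, ← ihj]
        have hL : (Nat.toDigits 2 (j / 2) ++ [if j % 2 = 1 then '1' else '0']).length =
            (Nat.toDigits 2 (j / 2)).length + 1 := by simp
        rw [hL]
        have : w + 1 - ((Nat.toDigits 2 (j / 2)).length + 1) = w - (Nat.toDigits 2 (j / 2)).length := by omega
        rw [this, List.append_assoc]

-- the string A builds for j is the model string
lemma zfill_toBin (n : Int) (w : Nat) (hw : n = (w : Int)) (hw1 : 1 ≤ w) (j : Nat) (hj : j < 2 ^ w) :
    PySem.Str.zfill (PySem.Int.toBin (j : Int)) n = String.ofList (bits w j) := by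
  apply String.ext
  rw [PySem.Str.toList_zfill, PySem.Int.toList_toBin]
  have h1 : PySem.Int.toBinChars (j : Int) = Nat.toDigits 2 j := by
    unfold PySem.Int.toBinChars
    rw [if_neg (by omega)]
    simp
  rw [h1, hw]
  obtain ⟨c, rest, hcr⟩ : ∃ c rest, Nat.toDigits 2 j = c :: rest := by
    cases h : Nat.toDigits 2 j with
    | nil => exact absurd h (toDigits_two_ne_nil j)
    | cons c rest => exact ⟨c, rest, rfl⟩
  have hc : c = '0' ∨ c = '1' := toDigits_two_01 j c (by rw [hcr]; simp)
  rw [hcr, zfill_nat c rest (by rcases hc with h | h <;> simp [h]) w, ← hcr, pad_bits w hw1 j hj]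
  simp

-- ---- Good on a cons ----

lemma good_cons (U : Nat → Bool) (w : Nat) (c : Char) (s : List Char) (hs : s.length = w) :
    Good U (w + 1) (c :: s) ↔ ((U w = false → c ≠ '1') ∧ Good U w s) := by
  have hrev : (c :: s).reverse = s.reverse ++ [c] := by simp
  constructor
  · intro h
    refine ⟨fun hu => ?_, fun p hp hu => ?_⟩
    · intro hc
      apply h w (by omega) hu
      rw [hrev, List.getElem?_append_right (by simp [hs])]
      simp [hs, hc]
    · intro hg
      apply h p (by omega) hu
      rw [hrev, List.getElem?_append_left (by simp [hs]; omega)]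
      exact hg
  · rintro ⟨h1, h2⟩ p hp hu
    by_cases hpw : p < w
    · intro hg
      apply h2 p hpw hu
      rw [hrev, List.getElem?_append_left (by simp [hs]; omega)] at hg
      exact hg
    · have : p = w := by omega
      subst this
      rw [hrev, List.getElem?_append_right (by simp [hs])]
      simp [hs]
      intro hc
      exact (h1 hu) hc

-- ---- the main combinational lemma ----

lemma main_lemma (U : Nat → Bool) : ∀ w : Nat,
    ((List.range (2 ^ w)).map (bits w)).filter (fun s => decide (Good U w s)) = genL U w := by
  intro w
  induction w with
  | zero => simp [bits, genL, Good]
  | succ w ih =>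
    have hsplit : List.range (2 ^ (w + 1)) =
        List.range (2 ^ w) ++ (List.range (2 ^ w)).map (fun j => 2 ^ w + j) := by
      rw [pow_succ, Nat.mul_two, List.range_add]
    have hlow : (List.range (2 ^ w)).map (bits (w + 1)) =
        (List.range (2 ^ w)).map (fun j => '0' :: bits w j) := by
      apply List.map_congr_left
      intro j hj
      rw [List.mem_range] at hj
      have := bits_cons w 0 j hj
      simpa using this
    have hhigh : ((List.range (2 ^ w)).map (fun j => 2 ^ w + j)).map (bits (w + 1)) =
        (List.range (2 ^ w)).map (fun j => '1' :: bits w j) := by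
      rw [List.map_map]
      apply List.map_congr_left
      intro j hj
      rw [List.mem_range] at hj
      have := bits_cons w 1 j hj
      simpa [Nat.add_comm] using this
    rw [hsplit, List.map_append, List.filter_append, hlow, hhigh]
    have hgood0 : ∀ j : Nat, (decide (Good U (w + 1) ('0' :: bits w j))) = decide (Good U w (bits w j)) := by
      intro j
      rw [decide_eq_decide, good_cons U w '0' (bits w j) (bits_length w j)]
      simp
    have hgood1 : ∀ j : Nat, (decide (Good U (w + 1) ('1' :: bits w j))) =
        (U w && decide (Good U w (bits w j))) := by
      intro j
      rcases h : U w with _ | _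
      · simp only [Bool.false_and, decide_eq_false_iff_not]
        rw [good_cons U w '1' (bits w j) (bits_length w j)]
        simp [h]
      · simp only [Bool.true_and]
        rw [decide_eq_decide, good_cons U w '1' (bits w j) (bits_length w j)]
        simp [h]
    rw [List.filter_map, List.filter_map]
    have e0 : ((List.range (2 ^ w)).filter ((fun s => decide (Good U (w + 1) s)) ∘ (fun j => '0' :: bits w j))) =
        (List.range (2 ^ w)).filter (fun j => decide (Good U w (bits w j))) := by
      apply List.filter_congr
      intro j _
      exact hgood0 j
    have e1 : ((List.range (2 ^ w)).filter ((fun s => decide (Good U (w + 1) s)) ∘ (fun j => '1' :: bits w j))) =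
        (List.range (2 ^ w)).filter (fun j => U w && decide (Good U w (bits w j))) := by
      apply List.filter_congr
      intro j _
      exact hgood1 j
    rw [e0, e1]
    have hfm : ∀ (c : Char), ((List.range (2 ^ w)).filter (fun j => decide (Good U w (bits w j)))).map ((fun j => c :: bits w j)) =
        (genL U w).map (c :: ·) := by
      intro c
      rw [← ih, List.filter_map]
      simp [Function.comp_def, List.map_map]
    rcases hU : U w with _ | _
    · have hnil : (List.range (2 ^ w)).filter (fun j => false && decide (Good U w (bits w j))) = [] := by
        simp
      rw [hnil, List.map_nil, List.append_nil,
        show genL U (w + 1) = (genL U w).map ('0' :: ·) by simp [genL, hU]]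
      exact hfm '0'
    · have htrue : (fun j => true && decide (Good U w (bits w j))) =
          (fun j => decide (Good U w (bits w j))) := by funext j; simp
      rw [htrue,
        show genL U (w + 1) = (genL U w).map ('0' :: ·) ++ (genL U w).map ('1' :: ·) by
          simp [genL, hU],
        hfm '0', hfm '1']

-- ---- string-level bridges ----

lemma pyRevStr_ofList (l : List Char) : pyRevStr (String.ofList l) = String.ofList l.reverse := by
  apply String.ext
  simp [pyRevStr]

-- one loop step of B, pushed through the product construction
lemma step_flat (qi : List Int) (U : Nat → Bool) (a : Nat) (acc : List String) (q : Int)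
    (hq : decide (q ∈ qi) = U a) :
    ((if q ∈ qi then acc.flatMap (fun s => [s ++ "0", s ++ "1"]) else acc.map (fun s => s ++ "0")).flatMap
      (fun s => (genL U a).map (fun t => s ++ String.ofList t)))
    = acc.flatMap (fun s => (genL U (a + 1)).map (fun t => s ++ String.ofList t)) := by
  by_cases h : q ∈ qi
  · have hU : U a = true := by rw [← hq]; simp [h]
    rw [if_pos h, List.flatMap_assoc]
    apply List.flatMap_congr
    intro s _
    rw [show genL U (a + 1) = (genL U a).map ('0' :: ·) ++ (genL U a).map ('1' :: ·) by
      simp [genL, hU]]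
    simp only [List.flatMap_cons, List.flatMap_nil, List.append_nil, List.map_append,
      List.map_map]
    congr 1
    · apply List.map_congr_left; intro t _; apply String.ext; simp
    · apply List.map_congr_left; intro t _; apply String.ext; simp
  · have hU : U a = false := by rw [← hq]; simp [h]
    rw [if_neg h, List.flatMap_map]  -- (acc.map f).flatMap g = acc.flatMap (g ∘ f)
    apply List.flatMap_congr
    intro s _
    rw [show genL U (a + 1) = (genL U a).map ('0' :: ·) by simp [genL, hU]]
    simp only [Function.comp_def, List.map_map]
    apply List.map_congr_left; intro t _; apply String.ext; simp

-- B's fold over descending positions computes the product construction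
lemma bl_desc (qi : List Int) : ∀ (a : Nat) (acc : List String),
    (PySem.List.pyRange ((a : Int) - 1) (-1) (-1)).foldl
      (fun acc p => if p ∈ qi then acc.flatMap (fun s => [s ++ "0", s ++ "1"])
        else acc.map (fun s => s ++ "0")) acc =
    acc.flatMap (fun s => (genL (fun p => decide ((p : Int) ∈ qi)) a).map (fun t => s ++ String.ofList t)) := by
  intro a
  induction a with
  | zero =>
    intro acc
    rw [PySem.List.pyRange_neg_one_eq_nil (by omega)]
    simp [genL]
  | succ a ih =>
    intro acc
    rw [show (((a + 1 : Nat) : Int)) - 1 = (a : Int) by push_cast; ring]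
    rw [PySem.List.pyRange_neg_one_cons (by omega)]
    rw [List.foldl_cons]
    rw [ih _]
    exact step_flat qi _ a acc (a : Int) rfl

-- B's fold over ascending positions computes the mirrored product construction
lemma bl_asc (qi : List Int) (w : Nat) : ∀ (a : Nat), a ≤ w → ∀ (acc : List String),
    (PySem.List.pyRange ((w : Int) - (a : Int)) (w : Int) 1).foldl
      (fun acc p => if p ∈ qi then acc.flatMap (fun s => [s ++ "0", s ++ "1"])
        else acc.map (fun s => s ++ "0")) acc =
    acc.flatMap (fun s => (genL (fun p => decide (((w - 1 - p : Nat) : Int) ∈ qi)) a).map (fun t => s ++ String.ofList t)) := by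
  intro a
  induction a with
  | zero =>
    intro _ acc
    rw [show (w : Int) - ((0 : Nat) : Int) = (w : Int) by omega]
    rw [PySem.List.pyRange_one_eq_nil (by omega)]
    simp [genL]
  | succ a ih =>
    intro ha acc
    rw [PySem.List.pyRange_one_cons (by omega)]
    rw [show (w : Int) - ((a + 1 : Nat) : Int) + 1 = (w : Int) - (a : Int) by omega]
    rw [List.foldl_cons]
    rw [ih (by omega) _]
    rw [show (w : Int) - ((a + 1 : Nat) : Int) = ((w - 1 - a : Nat) : Int) by omega]
    exact step_flat qi _ a acc _ rfl

lemma foldl_not_mem_filter (bad : List String) (l : List String) :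
    l.foldl (fun rel name => if name ∈ bad then rel else rel ++ [name]) [] =
      l.filter (fun name => decide (¬ name ∈ bad)) := by
  rw [show (fun (rel : List String) name => if name ∈ bad then rel else rel ++ [name])
      = (fun (rel : List String) name => if ¬ name ∈ bad then rel ++ [name] else rel) by
    funext rel name; by_cases h : name ∈ bad <;> simp [h]]
  rw [PySem.List.foldl_append_ite_eq_filter]
  simp

-- A's loops reduce to a filter of all_names by "no unselected position carries a '1'"
lemma a_main (qi : List Int) (n : Int) (rev : Bool) :
    (let all_names := bit_strings n rev
     let not_used := (PySem.List.pyRange 0 n 1).foldl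
       (fun acc j => if j ∈ qi then acc else acc ++ [j]) []
     let bad_names := all_names.foldl (fun bad name =>
       not_used.foldl (fun bad k =>
         if PySem.Str.pyGet? (pyRevStr name) k == some '1' then bad ++ [name] else bad) bad) []
     all_names.foldl (fun rel name => if name ∈ bad_names then rel else rel ++ [name]) [])
    = (bit_strings n rev).filter (fun name => decide (¬ ∃ k ∈ PySem.List.pyRange 0 n 1,
        k ∉ qi ∧ (PySem.Str.pyGet? (pyRevStr name) k == some '1') = true)) := by
  have hnu : ((PySem.List.pyRange 0 n 1).foldl
      (fun acc j => if j ∈ qi then acc else acc ++ [j]) ([] : List Int)) =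
      (PySem.List.pyRange 0 n 1).filter (fun j => decide (¬ j ∈ qi)) := by
    rw [show (fun (acc : List Int) j => if j ∈ qi then acc else acc ++ [j])
        = (fun (acc : List Int) j => if ¬ j ∈ qi then acc ++ [j] else acc) by
      funext acc j; by_cases h : j ∈ qi <;> simp [h]]
    rw [PySem.List.foldl_append_ite_eq_filter]
    simp
  simp only [hnu]
  set nu := (PySem.List.pyRange 0 n 1).filter (fun j => decide (¬ j ∈ qi)) with hnu_def
  have hinner : (fun (bad : List String) name =>
      nu.foldl (fun bad k =>
        if PySem.Str.pyGet? (pyRevStr name) k == some '1' then bad ++ [name] else bad) bad)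
      = (fun (bad : List String) name =>
        bad ++ (nu.filter (fun k => PySem.Str.pyGet? (pyRevStr name) k == some '1')).map (fun _ => name)) := by
    funext bad name
    rw [PySem.List.foldl_append_if (fun k => PySem.Str.pyGet? (pyRevStr name) k == some '1') (fun _ => name)]
  rw [hinner, PySem.List.foldl_append_eq_flatMap]
  simp only [List.nil_append]
  refine (foldl_not_mem_filter _ _).trans ?_
  apply List.filter_congr
  intro name hmem
  rw [decide_eq_decide]
  constructor
  · rintro hnb ⟨k, hkr, hknot, hget⟩
    exact hnb (List.mem_flatMap.2 ⟨name, hmem,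
      List.mem_map.2 ⟨k, List.mem_filter.2 ⟨List.mem_filter.2 ⟨hkr, by simp [hknot]⟩, hget⟩, rfl⟩⟩)
  · intro hne hb
    apply hne
    obtain ⟨nm, hnm, hmap⟩ := List.mem_flatMap.1 hb
    obtain ⟨k, hkf, rfl⟩ := List.mem_map.1 hmap
    obtain ⟨hknu, hget⟩ := List.mem_filter.1 hkf
    obtain ⟨hkr, hknq⟩ := List.mem_filter.1 hknu
    exact ⟨k, hkr, by simpa using hknq, hget⟩

-- the list of all zfilled binary strings is the model list
lemma all_names_model (n : Int) (w : Nat) (hw : n = (w : Int)) (hw1 : 1 ≤ w) :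
    (PySem.List.pyRange 0 (2 ^ n.toNat) 1).map
        (fun j => PySem.Str.zfill (PySem.Int.toBin j) n)
      = (List.range (2 ^ w)).map (fun j => String.ofList (bits w j)) := by
  have htn : n.toNat = w := by omega
  rw [htn]
  rw [show ((2 : Int) ^ w) = (((2 ^ w : Nat) : Int)) by push_cast; ring]
  rw [PySem.List.pyRange_one]
  rw [show ((((2 ^ w : Nat) : Int)) - 0).toNat = 2 ^ w by simp only [sub_zero, Int.toNat_natCast]]
  rw [List.map_map]
  apply List.map_congr_left
  intro j hj
  rw [List.mem_range] at hj
  simp only [Function.comp_def, zero_add]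
  exact zfill_toBin n w hw hw1 j hj

-- the filter predicate of a_main on a model string (rev = False)
lemma pred_false (qi : List Int) (n : Int) (w : Nat) (hw : n = (w : Int)) (l : List Char)
    (hl : l.length = w) :
    decide (¬ ∃ k ∈ PySem.List.pyRange 0 n 1,
        k ∉ qi ∧ (PySem.Str.pyGet? (pyRevStr (String.ofList l)) k == some '1') = true)
      = decide (Good (fun p => decide ((p : Int) ∈ qi)) w l) := by
  rw [decide_eq_decide]
  have hrv : ∀ k : Int, PySem.Str.pyGet? (pyRevStr (String.ofList l)) k
      = PySem.List.pyGet? l.reverse k := by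
    intro k; simp [pyRevStr]
  constructor
  · intro h p hp hU hget
    refine h ⟨(p : Int), by rw [PySem.List.mem_pyRange_one]; omega, by simpa using hU, ?_⟩
    rw [hrv, PySem.List.pyGet?_natCast, hget]
    simp
  · rintro hg ⟨k, hkmem, hknot, hget⟩
    rw [PySem.List.mem_pyRange_one] at hkmem
    rw [hrv, show k = ((k.toNat : Nat) : Int) by omega, PySem.List.pyGet?_natCast] at hget
    refine hg k.toNat (by omega) ?_ (by simpa using hget)
    simp only [decide_eq_false_iff_not]
    rw [show ((k.toNat : Nat) : Int) = k by omega]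
    exact hknot

-- the filter predicate of a_main on a reversed model string (rev = True)
lemma pred_true (qi : List Int) (n : Int) (w : Nat) (hw : n = (w : Int)) (l : List Char)
    (hl : l.length = w) :
    decide (¬ ∃ k ∈ PySem.List.pyRange 0 n 1,
        k ∉ qi ∧ (PySem.Str.pyGet? (pyRevStr (String.ofList l.reverse)) k == some '1') = true)
      = decide (Good (fun p => decide (((w - 1 - p : Nat) : Int) ∈ qi)) w l) := by
  rw [decide_eq_decide]
  have hrv : ∀ k : Int, PySem.Str.pyGet? (pyRevStr (String.ofList l.reverse)) k
      = PySem.List.pyGet? l k := by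
    intro k; simp [pyRevStr]
  have hidx : ∀ p : Nat, p < w → l.reverse[p]? = l[w - 1 - p]? := by
    intro p hp
    rw [List.getElem?_reverse (by omega)]
    congr 1
    omega
  constructor
  · intro h p hp hU hget
    rw [hidx p hp] at hget
    refine h ⟨((w - 1 - p : Nat) : Int), by rw [PySem.List.mem_pyRange_one]; omega,
      by simpa using hU, ?_⟩
    rw [hrv, PySem.List.pyGet?_natCast, hget]
    simp
  · rintro hg ⟨k, hkmem, hknot, hget⟩
    rw [PySem.List.mem_pyRange_one] at hkmem
    rw [hrv, show k = ((k.toNat : Nat) : Int) by omega, PySem.List.pyGet?_natCast] at hget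
    have hkt : k.toNat < w := by omega
    refine hg (w - 1 - k.toNat) (by omega) ?_ ?_
    · simp only [decide_eq_false_iff_not]
      rw [show ((w - 1 - (w - 1 - k.toNat) : Nat) : Int) = k by omega]
      exact hknot
    · rw [hidx _ (by omega), show w - 1 - (w - 1 - k.toNat) = k.toNat by omega]
      simpa using hget

-- both ports agree for every admissible effective size n (outside the changed region)
lemma central (qi : List Int) (rev : Bool) (n : Int) (hn : 0 ≤ n)
    (h1 : n = 1 → (0 : Int) ∈ qi) :
    (if n = 0 then ([""] : List String)
     else if n = 1 then ["0", "1"]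
     else
       let all_names := bit_strings n rev
       let not_used := (PySem.List.pyRange 0 n 1).foldl
         (fun acc j => if j ∈ qi then acc else acc ++ [j]) []
       let bad_names := all_names.foldl (fun bad name =>
         not_used.foldl (fun bad k =>
           if PySem.Str.pyGet? (pyRevStr name) k == some '1' then bad ++ [name] else bad) bad) []
       all_names.foldl (fun rel name => if name ∈ bad_names then rel else rel ++ [name]) [])
    = (let positions := if rev then PySem.List.pyRange 0 n 1 else PySem.List.pyRange (n - 1) (-1) (-1)
       let acc := positions.foldl (fun acc p =>
         if p ∈ qi then acc.flatMap (fun s => [s ++ "0", s ++ "1"])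
         else acc.map (fun s => s ++ "0")) [""]
       if rev then acc.map pyRevStr else acc) := by
  by_cases h0 : n = 0
  · subst h0
    rw [if_pos rfl]
    simp only []
    cases rev
    · rw [if_neg (by simp), if_neg (by simp),
        show PySem.List.pyRange (0 - 1 : Int) (-1) (-1) = ([] : List Int) from by decide]
      rfl
    · rw [if_pos rfl, if_pos rfl,
        show PySem.List.pyRange 0 (0 : Int) 1 = ([] : List Int) from by decide]
      rfl
  · by_cases h1' : n = 1
    · have h0m : (0 : Int) ∈ qi := h1 h1'
      subst h1'
      rw [if_neg h0, if_pos rfl]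
      simp only []
      cases rev
      · rw [if_neg (by simp), if_neg (by simp),
          show PySem.List.pyRange (1 - 1 : Int) (-1) (-1) = [0] from by decide]
        simp only [List.foldl_cons, List.foldl_nil]
        rw [if_pos h0m]
        decide
      · rw [if_pos rfl, if_pos rfl,
          show PySem.List.pyRange 0 (1 : Int) 1 = [0] from by decide]
        simp only [List.foldl_cons, List.foldl_nil]
        rw [if_pos h0m]
        decide
    · have h2 : 2 ≤ n := by omega
      have hw : n = (n.toNat : Int) := by omega
      set w := n.toNat with hwdef
      have hw1 : 1 ≤ w := by omega
      rw [if_neg h0, if_neg h1']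
      refine Eq.trans (a_main qi n rev) ?_
      cases rev
      · -- rev = False
        have hbs : bit_strings n false =
            (PySem.List.pyRange 0 (2 ^ n.toNat) 1).map
              (fun j => PySem.Str.zfill (PySem.Int.toBin j) n) := by
          simp [bit_strings]
        rw [hbs, all_names_model n w hw hw1, List.filter_map]
        have hm := main_lemma (fun p => decide ((p : Int) ∈ qi)) w
        rw [List.filter_map] at hm
        have hpf : ((fun name => decide (¬ ∃ k ∈ PySem.List.pyRange 0 n 1,
              k ∉ qi ∧ (PySem.Str.pyGet? (pyRevStr name) k == some '1') = true))
              ∘ (fun j => String.ofList (bits w j)))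
            = ((fun s => decide (Good (fun p => decide ((p : Int) ∈ qi)) w s)) ∘ bits w) := by
          funext j
          exact pred_false qi n w hw (bits w j) (bits_length w j)
        rw [hpf, show (fun j => String.ofList (bits w j)) = (String.ofList ∘ bits w) from rfl,
          ← List.map_map, hm]
        -- B side
        simp only [if_neg (by simp : ¬(false = true))]
        rw [show n - 1 = (w : Int) - 1 by omega, bl_desc qi w [""]]
        simp only [List.flatMap_cons, List.flatMap_nil, List.append_nil]
        apply List.map_congr_left
        intro t _
        apply String.ext
        simp
      · -- rev = True
        have hbs : bit_strings n true =
            (PySem.List.pyRange 0 (2 ^ n.toNat) 1).map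
              (pyRevStr ∘ (fun j => PySem.Str.zfill (PySem.Int.toBin j) n)) := by
          simp [bit_strings, Function.comp_def]
        rw [hbs, ← List.map_map, all_names_model n w hw hw1, List.map_map]
        have hg : (pyRevStr ∘ fun j => String.ofList (bits w j))
            = ((fun l => String.ofList l.reverse) ∘ bits w) := by
          funext j
          exact pyRevStr_ofList (bits w j)
        rw [hg, List.filter_map]
        have hm := main_lemma (fun p => decide (((w - 1 - p : Nat) : Int) ∈ qi)) w
        rw [List.filter_map] at hm
        have hpf : ((fun name => decide (¬ ∃ k ∈ PySem.List.pyRange 0 n 1,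
              k ∉ qi ∧ (PySem.Str.pyGet? (pyRevStr name) k == some '1') = true))
              ∘ ((fun l => String.ofList l.reverse) ∘ bits w))
            = ((fun s => decide (Good (fun p => decide (((w - 1 - p : Nat) : Int) ∈ qi)) w s)) ∘ bits w) := by
          funext j
          exact pred_true qi n w hw (bits w j) (bits_length w j)
        rw [hpf, ← List.map_map, hm]
        -- B side
        rw [if_pos rfl, if_pos rfl]
        have hb := bl_asc qi w w le_rfl [""]
        rw [show (w : Int) - (w : Int) = 0 by ring, ← hw] at hb
        rw [hb]
        simp only [List.flatMap_cons, List.flatMap_nil, List.append_nil, List.map_map]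
        apply List.map_congr_left
        intro t _
        apply String.ext
        simp [pyRevStr]

-- the changed region: both ports at effective size 1 with qubit 0 unselected
lemma a_one_some (qi : List Int) (rev : Bool) :
    register_names_qubits qi (some 1) rev = ["0", "1"] := rfl

lemma a_one_none (qi : List Int) (rev : Bool) (hlen : qi.length = 1) :
    register_names_qubits qi none rev = ["0", "1"] := by
  have hn : PySem.List.len qi = 1 := by simp [PySem.List.len_eq, hlen]
  show (if PySem.List.len qi = 0 then ([""] : List String)
    else if PySem.List.len qi = 1 then ["0", "1"] else _) = _
  rw [hn]
  norm_num

lemma alt_one (qi : List Int) (rev : Bool) (n : Int) (hn : n = 1) (h0 : (0 : Int) ∉ qi) :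
    ((let positions := if rev then PySem.List.pyRange 0 n 1 else PySem.List.pyRange (n - 1) (-1) (-1)
      let acc := positions.foldl (fun acc p =>
        if p ∈ qi then acc.flatMap (fun s => [s ++ "0", s ++ "1"])
        else acc.map (fun s => s ++ "0")) [""]
      if rev then acc.map pyRevStr else acc) : List String) = ["0"] := by
  subst hn
  simp only []
  cases rev
  · rw [if_neg (by simp), if_neg (by simp),
      show PySem.List.pyRange (1 - 1 : Int) (-1) (-1) = [0] from by decide]
    simp only [List.foldl_cons, List.foldl_nil]
    rw [if_neg h0]
    decide
  · rw [if_pos rfl, if_pos rfl,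
      show PySem.List.pyRange 0 (1 : Int) 1 = [0] from by decide]
    simp only [List.foldl_cons, List.foldl_nil]
    rw [if_neg h0]
    decide

-- ===== VERDICT (by name: the statement is the Claim_ definition above) =====
theorem register_names_qubits_spec : Claim_unchanged_register_names_qubits := by
  intro qi qrs rev hdom hpre hnd
  show register_names_qubits qi qrs rev = register_names_qubits_alt qi qrs rev
  rcases qrs with _ | m
  · refine central qi rev (PySem.List.len qi) (by simp [PySem.List.len_eq]) ?_
    intro hlen1
    by_contra h0
    exact hnd ⟨Or.inr ⟨rfl, by simp [PySem.List.len_eq] at hlen1; omega⟩, h0⟩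
  · refine central qi rev m (by simpa [Pre_register_names_qubits] using hpre.1) ?_
    intro hm1
    by_contra h0
    exact hnd ⟨Or.inl (by rw [hm1]), h0⟩

theorem register_names_qubits_changed : Claim_changed_register_names_qubits := by
  unfold Claim_changed_register_names_qubits; decide

theorem register_names_qubits_tight : Claim_exact_register_names_qubits := by
  intro qi qrs rev hdom hpre hD heq
  obtain ⟨hq, h0⟩ := hD
  rcases hq with rfl | ⟨rfl, hlen⟩
  · rw [a_one_some qi rev, show register_names_qubits_alt qi (some 1) rev = ["0"] from
      alt_one qi rev 1 rfl h0] at heq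
    simpa using congrArg List.length heq
  · rw [a_one_none qi rev hlen, show register_names_qubits_alt qi none rev = ["0"] from
      alt_one qi rev (PySem.List.len qi) (by simp [PySem.List.len_eq, hlen]) h0] at heq
    simpa using congrArg List.length heq
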